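-- pv_equiv track=rewrite | github.com/brucetony/PLABI | cube_happy.py | cubey
-- ===== SOURCE A (Python) =====
-- def cubey(n):
--     repeats = [160, 1, 352, 407, 217, 133, 136, 919, 370, 371, 1459, 244, 55, 153, 250]
--     if n <= 0:
--         raise ValueError("Input must be a positive value!")
--     split = list(str(n))
--     ints = [j ** 3 for j in [int(i) for i in split]]
--     sum_cubes = sum(ints)
--     while n != sum_cubes and sum_cubes not in repeats:
--         split = list(str(sum_cubes))
--         ints = [j ** 3 for j in [int(i) for i in split]]
--         sum_cubes = sum(ints)
--     if sum_cubes == n: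
--         return True
--     else:
--         return False
-- ===== SOURCE B (Python) =====
-- def cubey(n):
--     if n <= 0:
--         raise ValueError("Input must be a positive value!")
--     return sum(int(d) ** 3 for d in str(n)) == n
-- ===== Notes on version B (the rewrite author's own statement) =====
-- stated objective: simpler
-- what changed: Replaces the iterate-until-fixed-point-or-known-cycle while loop (and the hardcoded cycle table) with a single digit-cube-sum check: A can return True only when n is a fixed point of the digit-cube-sum map, so B returns sum(int(d)**3 for d in str(n)) == n directly.
import Mathlib
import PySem

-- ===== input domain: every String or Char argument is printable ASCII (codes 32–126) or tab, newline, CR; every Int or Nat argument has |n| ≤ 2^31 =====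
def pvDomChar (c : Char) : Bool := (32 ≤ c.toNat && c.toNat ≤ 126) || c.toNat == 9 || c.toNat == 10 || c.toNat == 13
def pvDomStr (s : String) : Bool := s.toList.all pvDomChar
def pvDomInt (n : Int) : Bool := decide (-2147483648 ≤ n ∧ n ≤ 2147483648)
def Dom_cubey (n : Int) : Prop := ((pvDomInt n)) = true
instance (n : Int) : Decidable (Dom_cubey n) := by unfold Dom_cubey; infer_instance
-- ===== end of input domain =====

-- B replaces A's iterate-until-cycle while loop (with its hardcoded cycle table) by a single
-- digit-cube-sum fixed-point test; objective: simpler (A can return True only at fixed points).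

-- ===== PORT A =====
def repeatsA : List Int := [160, 1, 352, 407, 217, 133, 136, 919, 370, 371, 1459, 244, 55, 153, 250]

-- split = list(str(m)); ints = [j**3 for j in [int(i) for i in split]]; sum(ints)
-- (int(i) on a single char: PySem.Int.ofStr?; getD 0 is unreachable since str of a
-- nonnegative int has only digit chars)
def sumCubesA (m : Int) : Int :=
  let split := (PySem.Int.toStr m).toList
  let ints := (split.map (fun i => (PySem.Int.ofStr? (String.mk [i])).getD 0)).map (fun j => j ^ 3)
  ints.sum

-- the while loop; fuel is only a totality guard (the Python loop always terminates)
def cubeyLoop (n : Int) : Nat → Int → Int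
  | 0, s => s
  | fuel+1, s => if n ≠ s ∧ s ∉ repeatsA then cubeyLoop n fuel (sumCubesA s) else s

def cubey (n : Int) : Bool :=
  if n ≤ 0 then false  -- Python raises ValueError here; excluded by Pre_cubey
  else
    let sum_cubes := sumCubesA n
    let r := cubeyLoop n 1000 sum_cubes
    decide (r = n)

-- ===== PORT B =====
def cubey_alt (n : Int) : Bool :=
  if n ≤ 0 then false  -- Python raises ValueError here; excluded by Pre_cubey
  else
    decide ((((PySem.Int.toStr n).toList.map
      (fun d => ((PySem.Int.ofStr? (String.mk [d])).getD 0) ^ 3)).sum) = n)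

-- ===== PRECONDITION & SPEC =====
-- Pre_ excludes exactly n ≤ 0, where A raises ValueError.
def Pre_cubey (n : Int) : Prop := 0 < n
instance (n : Int) : Decidable (Pre_cubey n) := by unfold Pre_cubey; infer_instance
def pvWitness_cubey : Int := 153

def Spec_cubey (n : Int) (out : Bool) : Prop := out = cubey_alt n
instance (n : Int) (out : Bool) : Decidable (Spec_cubey n out) := by unfold Spec_cubey; infer_instance

-- ===== CLAIM (what is proved, stated in full; the proofs are below) =====
def Claim_equal_cubey : Prop := ∀ (n : Int), Dom_cubey n → Pre_cubey n → Spec_cubey n (cubey n)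

-- ===== LEMMAS AND PROOFS =====

-- Nat-level mirror of the digit-cube-sum (fuel-structural so that `decide` can evaluate it)
def csAux : Nat → Nat → Nat
  | 0, _ => 0
  | f+1, n => if n = 0 then 0 else (n % 10) ^ 3 + csAux f (n / 10)

def gN (m : Nat) : Nat := csAux 12 m

def RN : List Nat := [160, 1, 352, 407, 217, 133, 136, 919, 370, 371, 1459, 244, 55, 153, 250]

def reachB : Nat → Nat → Bool
  | 0, s => RN.contains s
  | k+1, s => RN.contains s || reachB k (gN s)

-- Nat-level mirror of the loop
def loopN (nN : Nat) : Nat → Nat → Nat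
  | 0, s => s
  | f+1, s => if nN ≠ s ∧ s ∉ RN then loopN nN f (gN s) else s

-- `Nat.toDigitsCore` accumulates: pull the accumulator out
theorem toDigitsCore_append (b : Nat) :
    ∀ (f n : Nat) (acc : List Char),
      Nat.toDigitsCore b f n acc = Nat.toDigitsCore b f n [] ++ acc := by
  intro f
  induction f with
  | zero => intro n acc; simp [Nat.toDigitsCore]
  | succ f ih =>
    intro n acc
    simp only [Nat.toDigitsCore]
    by_cases h : n / b = 0
    · simp [h]
    · rw [if_neg h, if_neg h, ih (n / b) (Nat.digitChar (n % b) :: acc),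
        ih (n / b) (Nat.digitChar (n % b) :: [])]
      simp

theorem toDigitsCore_eq_digits :
    ∀ (f n : Nat), 0 < n → n < 10 ^ f →
      Nat.toDigitsCore 10 f n [] = ((Nat.digits 10 n).map Nat.digitChar).reverse := by
  intro f
  induction f with
  | zero => intro n h0 hf; omega
  | succ f ih =>
    intro n h0 hf
    simp only [Nat.toDigitsCore]
    rw [Nat.digits_def' (by norm_num : (1:Nat) < 10) h0]
    by_cases h : n / 10 = 0
    · rw [if_pos h, h]
      simp
    · rw [if_neg h, toDigitsCore_append, ih (n / 10) (Nat.pos_of_ne_zero h)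
        (by rw [pow_succ] at hf; omega)]
      simp

theorem toChars_eq (m : Nat) (h0 : 0 < m) :
    PySem.Int.toChars (m : Int) = ((Nat.digits 10 m).map Nat.digitChar).reverse := by
  unfold PySem.Int.toChars
  rw [if_neg (by omega)]
  simp only [Int.toNat_natCast]
  show Nat.toDigitsCore 10 (m + 1) m [] = _
  exact toDigitsCore_eq_digits (m + 1) m h0
    (lt_of_lt_of_le (Nat.lt_pow_self (by norm_num))
      (Nat.pow_le_pow_right (by norm_num) (Nat.le_succ m)))

theorem char_val (d : Nat) (hd : d < 10) :
    (PySem.Int.ofStr? (String.mk [Nat.digitChar d])).getD 0 = (d : Int) := by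
  interval_cases d <;> decide

theorem csAux_digits : ∀ (f m : Nat), m < 10 ^ f →
    csAux f m = ((Nat.digits 10 m).map (fun d => d ^ 3)).sum := by
  intro f
  induction f with
  | zero => intro m hm; interval_cases m; simp [csAux]
  | succ f ih =>
    intro m hm
    by_cases h0 : m = 0
    · subst h0; simp [csAux]
    · simp only [csAux, if_neg h0]
      rw [Nat.digits_def' (by norm_num : (1:Nat) < 10) (Nat.pos_of_ne_zero h0),
        ih (m / 10) (by rw [pow_succ] at hm; omega)]
      simp

-- the inline digit-cube-sum expression (B's body / A's helper) equals ↑(gN m)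
theorem scs_eq (m : Nat) (hm : m < 10 ^ 12) :
    ((PySem.Int.toStr (m : Int)).toList.map
      (fun d => ((PySem.Int.ofStr? (String.mk [d])).getD 0) ^ 3)).sum = ((gN m : Nat) : Int) := by
  by_cases h0 : m = 0
  · subst h0; decide
  · rw [PySem.Int.toList_toStr, toChars_eq m (Nat.pos_of_ne_zero h0), List.map_reverse,
      List.sum_reverse, List.map_map]
    unfold gN
    rw [csAux_digits 12 m hm, Nat.cast_list_sum, List.map_map]
    refine congrArg List.sum (List.map_congr_left ?_)
    intro d hd
    have hd10 : d < 10 := Nat.digits_lt_base (by norm_num) hd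
    simp only [Function.comp_apply, char_val d hd10]
    push_cast
    ring

theorem sumCubesA_eq (m : Nat) (hm : m < 10 ^ 12) : sumCubesA (m : Int) = ((gN m : Nat) : Int) := by
  unfold sumCubesA
  simp only [List.map_map]
  exact scs_eq m hm

theorem g_le (m k : Nat) (hk : k ≤ 12) (h : m < 10 ^ k) : gN m ≤ 729 * k := by
  unfold gN
  rw [csAux_digits 12 m (lt_of_lt_of_le h (Nat.pow_le_pow_right (by norm_num) hk))]
  have hlen : (Nat.digits 10 m).length ≤ k := by
    rw [Nat.digits_length_le_iff (by norm_num)]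
    exact h
  have := List.sum_le_card_nsmul ((Nat.digits 10 m).map (fun d => d ^ 3)) 729 (by
    intro x hx
    obtain ⟨d, hd, rfl⟩ := List.mem_map.mp hx
    have : d < 10 := Nat.digits_lt_base (by norm_num) hd
    calc d ^ 3 ≤ 9 ^ 3 := Nat.pow_le_pow_left (by omega) 3
    _ = 729 := by norm_num)
  simp only [List.length_map, smul_eq_mul] at this
  calc ((Nat.digits 10 m).map (fun d => d ^ 3)).sum ≤ (Nat.digits 10 m).length * 729 := this
    _ ≤ k * 729 := by exact Nat.mul_le_mul_right 729 hlen
    _ = 729 * k := Nat.mul_comm k 729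

theorem gB1 (m : Nat) (h : m ≤ 2147483648) : gN m ≤ 7290 := g_le m 10 (by norm_num) (by omega)

theorem gB2 (m : Nat) (h : m ≤ 7290) : gN m ≤ 2916 := g_le m 4 (by norm_num) (by omega)

theorem mem_repeats_cast (m : Nat) : ((m : Int) ∈ repeatsA) ↔ m ∈ RN := by
  simp only [repeatsA, RN, List.mem_cons, List.not_mem_nil, or_false]
  omega

theorem loop_cast (nN : Nat) :
    ∀ (fuel m : Nat), m ≤ 7290 →
      cubeyLoop (nN : Int) fuel (m : Int) = ((loopN nN fuel m : Nat) : Int) := by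
  intro fuel
  induction fuel with
  | zero => intro m hm; simp [cubeyLoop, loopN]
  | succ f ih =>
    intro m hm
    simp only [cubeyLoop, loopN]
    by_cases hc : nN ≠ m ∧ m ∉ RN
    · rw [if_pos (by exact ⟨by exact_mod_cast hc.1, fun hmem => hc.2 ((mem_repeats_cast m).mp hmem)⟩),
        if_pos hc, sumCubesA_eq m (by omega), ih (gN m) (le_trans (gB2 m hm) (by norm_num))]
    · rw [if_neg (by
        intro ⟨h1, h2⟩
        exact hc ⟨by exact_mod_cast h1, fun hmem => h2 ((mem_repeats_cast m).mpr hmem)⟩),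
        if_neg hc]

-- the 15 listed values form cycles of gN
theorem F1 : ∀ r ∈ RN, gN r ∈ RN := by decide

set_option maxHeartbeats 4000000 in
set_option maxRecDepth 20000 in
theorem F2a : ∀ s ∈ Finset.Icc 1 1000, reachB 13 s = true := by decide

set_option maxHeartbeats 4000000 in
set_option maxRecDepth 20000 in
theorem F2b : ∀ s ∈ Finset.Icc 1001 2000, reachB 13 s = true := by decide

set_option maxHeartbeats 4000000 in
set_option maxRecDepth 20000 in
theorem F2c : ∀ s ∈ Finset.Icc 2001 2916, reachB 13 s = true := by decide

theorem F2 (s : Nat) (h1 : 1 ≤ s) (h2 : s ≤ 2916) : reachB 13 s = true := by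
  by_cases h : s ≤ 1000
  · exact F2a s (Finset.mem_Icc.mpr ⟨h1, h⟩)
  · by_cases h' : s ≤ 2000
    · exact F2b s (Finset.mem_Icc.mpr ⟨by omega, h'⟩)
    · exact F2c s (Finset.mem_Icc.mpr ⟨by omega, h2⟩)

theorem reach_ex : ∀ (k s : Nat), reachB k s = true → ∃ j, j ≤ k ∧ gN^[j] s ∈ RN := by
  intro k
  induction k with
  | zero =>
    intro s h
    exact ⟨0, le_refl 0, by simpa [reachB] using h⟩
  | succ k ih =>
    intro s h
    simp only [reachB, Bool.or_eq_true] at h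
    rcases h with h | h
    · exact ⟨0, Nat.zero_le _, by simpa using h⟩
    · obtain ⟨j, hj, hmem⟩ := ih (gN s) h
      exact ⟨j + 1, by omega, by rwa [Function.iterate_succ_apply]⟩

-- if the loop exits with value nN (nN ∉ RN), then nN is periodic with no RN value before the period
theorem loop_periodic (nN : Nat) (hR : nN ∉ RN) :
    ∀ (fuel s t : Nat), 1 ≤ t → s = gN^[t] nN →
      (∀ r, 0 < r → r < t → gN^[r] nN ∉ RN ∧ gN^[r] nN ≠ nN) →
      loopN nN fuel s = nN →
      ∃ p, 1 ≤ p ∧ gN^[p] nN = nN ∧ ∀ r, r < p → gN^[r] nN ∉ RN := by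
  intro fuel
  induction fuel with
  | zero =>
    intro s t ht hs hprev h
    refine ⟨t, ht, by rw [← hs]; simpa [loopN] using h, ?_⟩
    intro r hr
    rcases Nat.eq_zero_or_pos r with h0 | h0
    · subst h0; simpa using hR
    · exact (hprev r h0 hr).1
  | succ f ih =>
    intro s t ht hs hprev h
    simp only [loopN] at h
    by_cases hc : nN ≠ s ∧ s ∉ RN
    · rw [if_pos hc] at h
      refine ih (gN s) (t + 1) (by omega) ?_ ?_ h
      · rw [hs]; exact (Function.iterate_succ_apply' gN t nN).symm
      · intro r h0 hr
        rcases Nat.lt_succ_iff_lt_or_eq.mp hr with hlt | heq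
        · exact hprev r h0 hlt
        · subst heq; rw [← hs]; exact ⟨hc.2, (hc.1).symm⟩
    · rw [if_neg hc] at h
      subst h
      refine ⟨t, ht, hs.symm, ?_⟩
      intro r hr
      rcases Nat.eq_zero_or_pos r with h0 | h0
      · subst h0; simpa using hR
      · exact (hprev r h0 hr).1

theorem iter_le (nN : Nat) (hn : nN ≤ 2147483648) : ∀ r, gN^[r + 1] nN ≤ 7290 := by
  intro r
  induction r with
  | zero => simpa using gB1 nN hn
  | succ r ih =>
    rw [Function.iterate_succ_apply']
    exact le_trans (gB2 _ ih) (by norm_num)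

theorem main_nat (nN : Nat) (h1 : 1 ≤ nN) (h2 : nN ≤ 2147483648) :
    (loopN nN 1000 (gN nN) = nN) ↔ gN nN = nN := by
  constructor
  · intro h
    by_contra hne
    by_cases hR : nN ∈ RN
    · have hg : gN nN ∈ RN := F1 _ hR
      have : loopN nN 1000 (gN nN) = gN nN := by
        show loopN nN (999 + 1) (gN nN) = gN nN
        simp [loopN, hg]
      rw [this] at h
      exact hne h
    · obtain ⟨p, hp1, hper, hnR⟩ := loop_periodic nN hR 1000 (gN nN) 1 (le_refl 1)
        (by simp) (by omega) h
      have hPer : Function.IsPeriodicPt gN p nN := hper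
      have h2p : gN^[p + p] nN = nN := by
        rw [Function.iterate_add_apply, hper, hper]
      have hnle : nN ≤ 2916 := by
        have hq : p + p = (p + p - 2) + 1 + 1 := by omega
        have hx : gN^[(p + p - 2) + 1] nN ≤ 7290 := iter_le nN h2 _
        have : gN (gN^[(p + p - 2) + 1] nN) = nN := by
          rw [show gN (gN^[(p + p - 2) + 1] nN) = gN^[(p + p - 2) + 1 + 1] nN from
            (Function.iterate_succ_apply' gN _ nN).symm, ← hq, h2p]
        rw [← this]
        exact le_trans (gB2 _ hx) (by norm_num)
      obtain ⟨j, _, hmem⟩ := reach_ex 13 nN (F2 nN h1 hnle)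
      have hmod : gN^[j % p] nN = gN^[j] nN := hPer.iterate_mod_apply j
      exact hnR (j % p) (Nat.mod_lt j (by omega)) (by rwa [hmod])
  · intro h
    rw [h]
    show loopN nN (999 + 1) nN = nN
    simp [loopN]

-- ===== VERDICT (by name: the statement is the Claim_ definition above) =====
theorem cubey_spec : Claim_equal_cubey := by
  intro n hdom hpre
  have hn : 0 < n := hpre
  have hn2 : n ≤ 2147483648 := by
    unfold Dom_cubey pvDomInt at hdom
    simp only [decide_eq_true_eq] at hdom
    exact hdom.2
  obtain ⟨m, rfl⟩ : ∃ m : Nat, n = (m : Int) :=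
    ⟨n.toNat, (Int.toNat_of_nonneg (le_of_lt hn)).symm⟩
  have hm1 : 1 ≤ m := by exact_mod_cast hn
  have hm2 : m ≤ 2147483648 := by exact_mod_cast hn2
  show cubey (m : Int) = cubey_alt (m : Int)
  unfold cubey cubey_alt
  rw [if_neg (by omega), if_neg (by omega)]
  simp only
  rw [sumCubesA_eq m (by omega), loop_cast m 1000 (gN m) (gB1 m hm2),
    scs_eq m (by omega)]
  simp only [Int.natCast_inj]
  exact decide_eq_decide.mpr (main_nat m hm1 hm2)
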